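-- pv_equiv track=rewrite | github.com/Divyanshu6928/Competitive_Programming | CodeForces/Shifts_and_Sortings.py | min_total_cost
-- ===== SOURCE A (Python) =====
-- def min_total_cost(s):
--     n = len(s)
--     cost = 0
--     i = 0
--
--     while i < n:
--         j = i
--         while j < n - 1 and s[j] <= s[j + 1]:  # Find increasing subsequence
--             j += 1
--
--         # Calculate cost of sorting this increasing subsequence
--         cost += (j - i + 1) * (j - i + 2) // 2
--
--         i = j + 1
--
--     return cost
-- ===== SOURCE B (Python) =====
-- def min_total_cost(s):
--     cost = 0
--     run = 0
--     prev = None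
--     for c in s:
--         run = run + 1 if prev is not None and prev <= c else 1
--         cost += run
--         prev = c
--     return cost
-- ===== Notes on version B (the rewrite author's own statement) =====
-- stated objective: simpler
-- what changed: Replaces the nested boundary-finding while-loop plus the L*(L+1)//2 closed form per run with a single flat pass that keeps a running run-length counter and adds it to the cost at every character.
import Mathlib
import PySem

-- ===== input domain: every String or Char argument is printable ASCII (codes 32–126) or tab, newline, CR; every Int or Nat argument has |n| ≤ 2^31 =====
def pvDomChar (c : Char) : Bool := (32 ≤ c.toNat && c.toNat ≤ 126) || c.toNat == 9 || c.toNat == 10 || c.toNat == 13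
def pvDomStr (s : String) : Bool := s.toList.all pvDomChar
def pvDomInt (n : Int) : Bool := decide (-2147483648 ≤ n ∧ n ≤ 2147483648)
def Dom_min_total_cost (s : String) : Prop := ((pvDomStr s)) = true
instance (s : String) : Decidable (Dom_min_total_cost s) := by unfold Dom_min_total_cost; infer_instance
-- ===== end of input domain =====

-- B replaces A's nested run-boundary search plus per-run L*(L+1)//2 closed form by one
-- flat pass with a running run-length counter added to the cost at each character (simpler).

-- ===== PORT A =====
-- inner 'while j < n - 1 and s[j] <= s[j + 1]: j += 1' (indices always in range when read)
def pvInnerJ (cs : List Char) (n j : Nat) : Nat :=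
  if j < n - 1 ∧ cs.getD j ' ' ≤ cs.getD (j + 1) ' ' then pvInnerJ cs n (j + 1) else j
termination_by n - j
decreasing_by omega

-- termination helper for the outer loop (cited by pvOuterA's decreasing_by)
lemma pvInnerJ_ge (cs : List Char) (n j : Nat) : j ≤ pvInnerJ cs n j := by
  generalize hk : n - j = k
  induction k using Nat.strong_induction_on generalizing j with
  | _ k ih =>
    rw [pvInnerJ]
    split
    · rename_i hc
      have h1 : j + 1 ≤ pvInnerJ cs n (j + 1) := ih (n - (j + 1)) (by omega) (j + 1) rfl
      omega
    · omega

-- outer 'while i < n' loop; '//' on the nonnegative product is Nat division, exact here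
def pvOuterA (cs : List Char) (n i : Nat) (cost : Int) : Int :=
  if h : i < n then
    let j := pvInnerJ cs n i
    pvOuterA cs n (j + 1) (cost + (((j - i + 1) * (j - i + 2) / 2 : Nat) : Int))
  else cost
termination_by n - i
decreasing_by
  have := pvInnerJ_ge cs n i
  omega

def min_total_cost (s : String) : Int :=
  pvOuterA s.toList s.toList.length 0 0

-- ===== PORT B =====
-- 'for c in s' with state (prev, run, cost); prev is None before the first character
def pvAltLoop : List Char → Option Char → Int → Int → Int
  | [], _, _, cost => cost
  | c :: rest, prev, run, cost =>
      let run' : Int :=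
        match prev with
        | some p => if p ≤ c then run + 1 else 1
        | none => 1
      pvAltLoop rest (some c) run' (cost + run')

def min_total_cost_alt (s : String) : Int :=
  pvAltLoop s.toList none 0 0

-- ===== PRECONDITION & SPEC =====
def Spec_min_total_cost (s : String) (out : Int) : Prop := out = min_total_cost_alt s
instance (s : String) (out : Int) : Decidable (Spec_min_total_cost s out) := by unfold Spec_min_total_cost; infer_instance

-- ===== CLAIM (what is proved, stated in full; the proofs are below) =====
def Claim_equal_min_total_cost : Prop := ∀ (s : String), Dom_min_total_cost s → Spec_min_total_cost s (min_total_cost s)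

-- ===== LEMMAS AND PROOFS =====

-- length of the maximal non-decreasing prefix run
def pvRunLen : List Char → Nat
  | [] => 0
  | c :: rest =>
    match rest with
    | [] => 1
    | d :: _ => if c ≤ d then pvRunLen rest + 1 else 1

def pvTri : Nat → Nat
  | 0 => 0
  | m + 1 => pvTri m + (m + 1)

-- common specification: sum of triangular costs over the maximal runs
def pvG (cs : List Char) : Int :=
  if h : cs = [] then 0
  else ((pvTri (pvRunLen cs) : Nat) : Int) + pvG (cs.drop (pvRunLen cs))
termination_by cs.length
decreasing_by
  have h1 : 1 ≤ pvRunLen cs := by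
    cases cs with
    | nil => simp at h
    | cons c rest => cases rest <;> simp [pvRunLen] <;> split <;> omega
  have h2 : cs.length ≠ 0 := by simpa using h
  simp [List.length_drop]; omega

lemma pvG_nil : pvG [] = 0 := by rw [pvG]; simp

lemma pvG_cons (c : Char) (rest : List Char) :
    pvG (c :: rest) =
      ((pvTri (pvRunLen (c :: rest)) : Nat) : Int)
        + pvG ((c :: rest).drop (pvRunLen (c :: rest))) := by
  rw [pvG]; simp

lemma pvRunLen_pos (c : Char) (rest : List Char) : 1 ≤ pvRunLen (c :: rest) := by
  cases rest <;> simp [pvRunLen] <;> split <;> omega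

lemma pvRunLen_le_length (cs : List Char) : pvRunLen cs ≤ cs.length := by
  induction cs with
  | nil => simp [pvRunLen]
  | cons c rest ih =>
    cases rest with
    | nil => simp [pvRunLen]
    | cons d t =>
      simp only [pvRunLen]
      split
      · simpa using ih
      · simp

lemma pvTri_eq (m : Nat) : pvTri m = m * (m + 1) / 2 := by
  induction m with
  | zero => simp [pvTri]
  | succ m ih =>
    have hring : (m + 1) * (m + 1 + 1) = m * (m + 1) + 2 * (m + 1) := by ring
    obtain ⟨k, hk⟩ := Nat.even_mul_succ_self m
    simp only [pvTri, ih]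
    omega

lemma pvInnerJ_spec (cs : List Char) (i : Nat) (hi : i < cs.length) :
    pvInnerJ cs cs.length i = i + pvRunLen (cs.drop i) - 1 := by
  generalize hk : cs.length - i = k
  induction k using Nat.strong_induction_on generalizing i with
  | _ k ih =>
    have hdrop : cs.drop i = cs[i] :: cs.drop (i + 1) := List.drop_eq_getElem_cons hi
    rw [pvInnerJ]
    by_cases hlt : i < cs.length - 1
    · have hi1 : i + 1 < cs.length := by omega
      have hdrop1 : cs.drop (i + 1) = cs[i + 1] :: cs.drop (i + 2) := List.drop_eq_getElem_cons hi1
      have hg1 : cs.getD i ' ' = cs[i] := List.getD_eq_getElem cs ' ' hi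
      have hg2 : cs.getD (i + 1) ' ' = cs[i + 1] := List.getD_eq_getElem cs ' ' hi1
      by_cases hle : cs[i] ≤ cs[i + 1]
      · rw [if_pos ⟨hlt, by rw [hg1, hg2]; exact hle⟩]
        have := ih (cs.length - (i + 1)) (by omega) (i + 1) hi1 rfl
        rw [this]
        have hrl : pvRunLen (cs.drop i) = pvRunLen (cs.drop (i + 1)) + 1 := by
          rw [hdrop, hdrop1, pvRunLen, if_pos hle]
        have hp : 1 ≤ pvRunLen (cs.drop (i + 1)) := by
          rw [hdrop1]; exact pvRunLen_pos _ _
        omega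
      · rw [if_neg (by rw [hg1, hg2]; intro h; exact hle h.2)]
        have hrl : pvRunLen (cs.drop i) = 1 := by
          rw [hdrop, hdrop1, pvRunLen, if_neg hle]
        omega
    · rw [if_neg (by intro h; exact hlt h.1)]
      have : cs.drop (i + 1) = [] := by
        apply List.drop_eq_nil_of_le; omega
      have hrl : pvRunLen (cs.drop i) = 1 := by
        rw [hdrop, this, pvRunLen]
      omega

lemma pvOuterA_eq (cs : List Char) (i : Nat) (cost : Int) :
    pvOuterA cs cs.length i cost = cost + pvG (cs.drop i) := by
  generalize hk : cs.length - i = k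
  induction k using Nat.strong_induction_on generalizing i cost with
  | _ k ih =>
    rw [pvOuterA]
    by_cases hi : i < cs.length
    · rw [dif_pos hi]
      set m := pvRunLen (cs.drop i) with hm
      have hj : pvInnerJ cs cs.length i = i + m - 1 := pvInnerJ_spec cs i hi
      have hdrop : cs.drop i = cs[i] :: cs.drop (i + 1) := List.drop_eq_getElem_cons hi
      have hmp : 1 ≤ m := by rw [hm, hdrop]; exact pvRunLen_pos _ _
      have hml : m ≤ cs.length - i := by
        have := pvRunLen_le_length (cs.drop i)
        simpa [List.length_drop] using this
      simp only [hj]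
      have hstep : i + m - 1 + 1 = i + m := by omega
      have harith : i + m - 1 - i + 1 = m := by omega
      have harith2 : i + m - 1 - i + 2 = m + 1 := by omega
      rw [hstep, harith, harith2]
      rw [ih (cs.length - (i + m)) (by omega) (i + m) _ rfl]
      have hG : pvG (cs.drop i) = ((pvTri m : Nat) : Int) + pvG ((cs.drop i).drop m) := by
        rw [pvG, dif_neg (show ¬(cs.drop i = []) by simp [List.drop_eq_nil_iff]; omega)]
      have hdd : (cs.drop i).drop m = cs.drop (i + m) := by
        rw [List.drop_drop]
      rw [hG, hdd, ← pvTri_eq]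
      ring
    · rw [dif_neg hi]
      have h0 : cs.drop i = [] := List.drop_eq_nil_of_le (by omega)
      rw [h0, pvG]
      simp

lemma pvAltLoop_some (cs : List Char) (p : Char) (run cost : Int) :
    pvAltLoop cs (some p) run cost =
      match cs with
      | [] => cost
      | c :: _ =>
        if p ≤ c then
          cost + run * ((pvRunLen cs : Nat) : Int) + ((pvTri (pvRunLen cs) : Nat) : Int)
            + pvG (cs.drop (pvRunLen cs))
        else cost + pvG cs := by
  induction cs generalizing p run cost with
  | nil => simp [pvAltLoop]
  | cons c rest ih =>
    simp only [pvAltLoop]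
    by_cases hpc : p ≤ c
    · simp only [if_pos hpc]
      rw [ih]
      cases rest with
      | nil =>
        simp [pvRunLen, pvTri, pvG_nil]
        ring
      | cons d t =>
        by_cases hcd : c ≤ d
        · simp only [if_pos hcd]
          have hrl : pvRunLen (c :: d :: t) = pvRunLen (d :: t) + 1 := by
            rw [pvRunLen, if_pos hcd]
          set m := pvRunLen (d :: t) with hm
          have htri : pvTri (m + 1) = pvTri m + (m + 1) := rfl
          rw [hrl, htri]
          have hd : (c :: d :: t).drop (m + 1) = (d :: t).drop m := by simp
          rw [hd]
          push_cast
          ring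
        · simp only [if_neg hcd]
          have hrl : pvRunLen (c :: d :: t) = 1 := by rw [pvRunLen, if_neg hcd]
          rw [hrl]
          simp [pvTri]
          ring
    · simp only [if_neg hpc]
      rw [ih]
      cases rest with
      | nil =>
        simp [pvRunLen, pvTri, pvG_cons, pvG_nil]
      | cons d t =>
        by_cases hcd : c ≤ d
        · simp only [if_pos hcd]
          have hrl : pvRunLen (c :: d :: t) = pvRunLen (d :: t) + 1 := by
            rw [pvRunLen, if_pos hcd]
          set m := pvRunLen (d :: t) with hm
          have hG : pvG (c :: d :: t) = ((pvTri (m + 1) : Nat) : Int) + pvG ((d :: t).drop m) := by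
            rw [pvG_cons, hrl]; simp
          rw [hG]
          have htri : pvTri (m + 1) = pvTri m + (m + 1) := rfl
          rw [htri]
          push_cast
          ring
        · simp only [if_neg hcd]
          have hrl : pvRunLen (c :: d :: t) = 1 := by rw [pvRunLen, if_neg hcd]
          have hG : pvG (c :: d :: t) = ((pvTri 1 : Nat) : Int) + pvG (d :: t) := by
            rw [pvG_cons, hrl]; simp
          rw [hG]
          simp [pvTri]
          ring

lemma pvAltLoop_none (cs : List Char) (run cost : Int) :
    pvAltLoop cs none run cost = cost + pvG cs := by
  cases cs with
  | nil => simp [pvAltLoop, pvG_nil]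
  | cons c rest =>
    simp only [pvAltLoop]
    rw [pvAltLoop_some]
    cases rest with
    | nil => simp [pvG_cons, pvG_nil, pvRunLen, pvTri]
    | cons d t =>
      by_cases hcd : c ≤ d
      · simp only [if_pos hcd]
        have hrl : pvRunLen (c :: d :: t) = pvRunLen (d :: t) + 1 := by
          rw [pvRunLen, if_pos hcd]
        set m := pvRunLen (d :: t) with hm
        have hG : pvG (c :: d :: t) = ((pvTri (m + 1) : Nat) : Int) + pvG ((d :: t).drop m) := by
          rw [pvG_cons, hrl]; simp
        rw [hG]
        have htri : pvTri (m + 1) = pvTri m + (m + 1) := rfl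
        rw [htri]
        push_cast
        ring
      · simp only [if_neg hcd]
        have hrl : pvRunLen (c :: d :: t) = 1 := by rw [pvRunLen, if_neg hcd]
        have hG : pvG (c :: d :: t) = ((pvTri 1 : Nat) : Int) + pvG (d :: t) := by
          rw [pvG_cons, hrl]; simp
        rw [hG]
        simp [pvTri]
        ring

-- ===== VERDICT (by name: the statement is the Claim_ definition above) =====
theorem min_total_cost_spec : Claim_equal_min_total_cost := by
  intro s _
  unfold Spec_min_total_cost min_total_cost min_total_cost_alt
  rw [pvAltLoop_none, pvOuterA_eq]
  simp
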